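-- pv_equiv track=rewrite | github.com/akent4000/Universal-Gate-Compiler | nand_optimizer/sequential/fsm.py | _bits_for
-- ===== SOURCE A (Python) =====
-- def _bits_for(n: int) -> int:
--     if n <= 1:
--         return 1
--     w = 0
--     m = n - 1
--     while m > 0:
--         w += 1
--         m >>= 1
--     return w
-- ===== SOURCE B (Python) =====
-- def _bits_for(n: int) -> int:
--     if n <= 1:
--         return 1
--     return (n - 1).bit_length()
-- ===== Notes on version B (the rewrite author's own statement) =====
-- stated objective: idiomatic
-- what changed: Replaces the shift-and-count while loop with the closed-form built-in (n-1).bit_length().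
import Mathlib
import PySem

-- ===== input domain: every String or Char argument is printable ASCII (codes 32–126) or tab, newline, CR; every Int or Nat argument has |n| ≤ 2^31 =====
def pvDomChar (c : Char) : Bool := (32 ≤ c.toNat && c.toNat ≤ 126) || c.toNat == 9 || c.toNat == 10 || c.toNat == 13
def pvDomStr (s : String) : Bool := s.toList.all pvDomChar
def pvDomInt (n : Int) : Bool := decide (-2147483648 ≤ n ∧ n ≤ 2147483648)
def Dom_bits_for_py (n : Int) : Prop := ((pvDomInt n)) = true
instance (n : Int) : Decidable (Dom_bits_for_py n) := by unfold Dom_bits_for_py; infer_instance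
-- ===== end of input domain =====

-- B replaces A's shift-and-count loop with the closed-form bit_length of n-1 (idiomatic).

-- ===== PORT A =====
-- the while loop: m starts at n-1 ≥ 1 when the loop is reached, so m is a Nat;
-- m >>= 1 on a nonnegative int is m / 2
def bitsForLoop (m : Nat) (w : Int) : Int :=
  if m > 0 then bitsForLoop (m / 2) (w + 1) else w
decreasing_by exact Nat.div_lt_self (by omega) (by omega)

def bits_for_py (n : Int) : Int :=
  if n ≤ 1 then 1
  else bitsForLoop (n - 1).toNat 0

-- ===== PORT B =====
-- Python's m.bit_length() for m ≥ 1 is Nat.log2 m + 1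
def bits_for_py_alt (n : Int) : Int :=
  if n ≤ 1 then 1
  else ((n - 1).toNat.log2 + 1 : Nat)

-- ===== PRECONDITION & SPEC =====
def Spec_bits_for_py (n : Int) (out : Int) : Prop := out = bits_for_py_alt n
instance (n : Int) (out : Int) : Decidable (Spec_bits_for_py n out) := by unfold Spec_bits_for_py; infer_instance

-- ===== CLAIM (what is proved, stated in full; the proofs are below) =====
def Claim_equal_bits_for_py : Prop := ∀ (n : Int), Dom_bits_for_py n → Spec_bits_for_py n (bits_for_py n)

-- ===== LEMMAS AND PROOFS =====

theorem bitsForLoop_shift (m : Nat) (w : Int) : bitsForLoop m w = w + bitsForLoop m 0 := by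
  induction m using Nat.strong_induction_on generalizing w with
  | _ m ih =>
    by_cases h : m > 0
    · rw [bitsForLoop, if_pos h, ih _ (Nat.div_lt_self h (by omega)) (w + 1)]
      conv_rhs => rw [bitsForLoop, if_pos h, ih _ (Nat.div_lt_self h (by omega)) (0 + 1)]
      ring
    · rw [bitsForLoop, if_neg h]
      conv_rhs => rw [bitsForLoop, if_neg h]
      ring

theorem bitsForLoop_log2 (m : Nat) (hm : 0 < m) : bitsForLoop m 0 = (Nat.log2 m + 1 : Nat) := by
  induction m using Nat.strong_induction_on with
  | _ m ih =>
    rw [bitsForLoop, if_pos hm, bitsForLoop_shift]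
    by_cases h2 : 2 ≤ m
    · rw [ih (m / 2) (Nat.div_lt_self hm (by omega)) (Nat.div_pos h2 (by omega))]
      have hl : m.log2 = (m / 2).log2 + 1 := by
        rw [Nat.log2_eq_log_two, Nat.log2_eq_log_two, Nat.log_div_base]
        have hp : 0 < Nat.log 2 m := Nat.log_pos Nat.one_lt_two h2
        omega
      rw [hl]
      push_cast
      ring
    · have h1 : m = 1 := by omega
      subst h1
      rw [bitsForLoop]
      norm_num [Nat.log2]

-- ===== VERDICT (by name: the statement is the Claim_ definition above) =====
theorem bits_for_py_spec : Claim_equal_bits_for_py := by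
  intro n _
  unfold Spec_bits_for_py bits_for_py bits_for_py_alt
  by_cases h : n ≤ 1
  · simp [h]
  · rw [if_neg h]
    conv_rhs => rw [if_neg h]
    exact bitsForLoop_log2 (n - 1).toNat (by omega)
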